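-- pv_equiv track=rewrite | github.com/Northshoot/dOPE | dope/cache/CacheModelFull.py | encoding_cmp
-- ===== SOURCE A (Python) =====
-- def encoding_cmp(enc1, enc2):
--     ''' Comapare two encoding lists of 1s and 0s.  Preceding 0s make
--         encodings comparitively lower than preceding 1s
--     '''
--     if enc1 == []:
--         if enc2 == []:
--             return 0
--         elif enc2[0] == 0:
--             return 1
--         else:
--             return -1
--     if enc2 == []:
--         if enc1 == []:
--             return 0
--         elif enc1[0] == 0:
--             return -1
--         else:
--             return 1
--
--     if enc1[0] == enc2[0]:
--         if len(enc1) == 1 and len(enc2) == 1: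
--             return 0
--         elif len(enc1) == 1:
--             if enc2[1] == 1:
--                 return -1
--             else:
--                 return 1
--         elif len(enc2) == 1:
--             if enc1[1] == 1:
--                 return 1
--             else:
--                 return -1
--         else:
--             return encoding_cmp(enc1[1:], enc2[1:])
--
--     assert(enc1[0] != enc2[0])
--     if enc1[0] == 0:
--         return -1
--     else:
--         return 1
-- ===== SOURCE B (Python) =====
-- def encoding_cmp(enc1, enc2):
--     ''' Compare two encoding lists: single left-to-right pass over the
--         paired elements, then a separate length tie-break (no slicing).
--     '''
--     if not enc1 or not enc2:
--         if enc1: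
--             return -1 if enc1[0] == 0 else 1
--         if enc2:
--             return 1 if enc2[0] == 0 else -1
--         return 0
--     for a, b in zip(enc1, enc2):
--         if a != b:
--             return -1 if a == 0 else 1
--     if len(enc1) == len(enc2):
--         return 0
--     if len(enc1) < len(enc2):
--         return -1 if enc2[len(enc1)] == 1 else 1
--     return 1 if enc1[len(enc2)] == 1 else -1
-- ===== Notes on version B (the rewrite author's own statement) =====
-- stated objective: faster
-- what changed: Replaces the slicing recursion (which copies both tails at every step) with a single index-free pass over zip(enc1, enc2) plus a separate length tie-break on the element just past the common prefix.
import Mathlib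
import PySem

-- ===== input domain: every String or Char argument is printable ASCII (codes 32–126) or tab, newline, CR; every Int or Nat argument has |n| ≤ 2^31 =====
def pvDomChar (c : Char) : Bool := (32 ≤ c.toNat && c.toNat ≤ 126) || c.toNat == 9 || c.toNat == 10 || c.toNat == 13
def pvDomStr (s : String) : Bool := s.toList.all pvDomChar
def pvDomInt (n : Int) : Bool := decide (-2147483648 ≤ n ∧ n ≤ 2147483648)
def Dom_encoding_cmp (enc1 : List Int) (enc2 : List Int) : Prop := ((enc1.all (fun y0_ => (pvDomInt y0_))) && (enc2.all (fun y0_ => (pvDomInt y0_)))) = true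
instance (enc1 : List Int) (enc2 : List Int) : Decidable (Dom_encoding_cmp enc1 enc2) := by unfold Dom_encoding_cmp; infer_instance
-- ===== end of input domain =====

-- B replaces A's tail-slicing recursion by one linear pass over the zipped lists plus a
-- separate length tie-break; proved to return exactly A's value on every pair of int lists.

-- ===== PORT A =====
-- Literal transliteration of A's recursion: the empty checks, the head comparison,
-- the len==1 tie-breaks inspecting the other list's second element, and the
-- recursion on both tails (enc1[1:], enc2[1:]) kept as structural recursion.
def encoding_cmp (enc1 : List Int) (enc2 : List Int) : Int :=
  match enc1, enc2 with
  | [], [] => 0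
  | [], b :: _ => if b = 0 then 1 else -1
  | a :: _, [] => if a = 0 then -1 else 1
  | a :: t1, b :: t2 =>
    if a = b then
      match t1, t2 with
      | [], [] => 0
      | [], b2 :: _ => if b2 = 1 then -1 else 1
      | a2 :: _, [] => if a2 = 1 then 1 else -1
      | _ :: _, _ :: _ => encoding_cmp t1 t2
    else
      if a = 0 then -1 else 1

-- ===== PORT B =====
-- B's 'for a, b in zip(...)' loop with its early return: first differing pair decides.
def firstMismatch : List (Int × Int) → Option Int
  | [] => none
  | (a, b) :: rest => if a ≠ b then some (if a = 0 then -1 else 1) else firstMismatch rest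

def encoding_cmp_alt (enc1 : List Int) (enc2 : List Int) : Int :=
  if enc1 = [] ∨ enc2 = [] then
    match enc1, enc2 with
    | a :: _, _ => if a = 0 then -1 else 1
    | _, b :: _ => if b = 0 then 1 else -1
    | _, _ => 0
  else
    match firstMismatch (enc1.zip enc2) with
    | some r => r
    | none =>
      if enc1.length = enc2.length then 0
      else if enc1.length < enc2.length then
        -- enc2[len(enc1)]: in range since len enc2 > len enc1 here
        if enc2.getD enc1.length 0 = 1 then -1 else 1
      else
        if enc1.getD enc2.length 0 = 1 then 1 else -1

-- ===== PRECONDITION & SPEC =====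
def Spec_encoding_cmp (enc1 : List Int) (enc2 : List Int) (out : Int) : Prop := out = encoding_cmp_alt enc1 enc2
instance (enc1 : List Int) (enc2 : List Int) (out : Int) : Decidable (Spec_encoding_cmp enc1 enc2 out) := by unfold Spec_encoding_cmp; infer_instance

-- ===== CLAIM (what is proved, stated in full; the proofs are below) =====
def Claim_equal_encoding_cmp : Prop := ∀ (enc1 : List Int) (enc2 : List Int), Dom_encoding_cmp enc1 enc2 → Spec_encoding_cmp enc1 enc2 (encoding_cmp enc1 enc2)

-- ===== LEMMAS AND PROOFS =====

-- When both tails are nonempty and the heads agree, B also reduces to the tails.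
theorem alt_cons_cons (a : Int) (x : Int) (t1 : List Int) (y : Int) (t2 : List Int) :
    encoding_cmp_alt (a :: x :: t1) (a :: y :: t2) = encoding_cmp_alt (x :: t1) (y :: t2) := by
  by_cases h : x = y
  · subst h
    simp [encoding_cmp_alt, firstMismatch]
  · simp [encoding_cmp_alt, firstMismatch, h]

theorem ab_eq : ∀ (enc1 enc2 : List Int), encoding_cmp enc1 enc2 = encoding_cmp_alt enc1 enc2 := by
  intro enc1
  induction enc1 with
  | nil => intro enc2; cases enc2 <;> simp [encoding_cmp, encoding_cmp_alt]
  | cons a t1 ih =>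
    intro enc2
    cases enc2 with
    | nil => simp [encoding_cmp, encoding_cmp_alt]
    | cons b t2 =>
      by_cases hab : a = b
      · subst hab
        cases t1 with
        | nil =>
          cases t2 <;> simp [encoding_cmp, encoding_cmp_alt, firstMismatch]
        | cons x tx =>
          cases t2 with
          | nil => simp [encoding_cmp, encoding_cmp_alt, firstMismatch]
          | cons y ty =>
            rw [show encoding_cmp (a :: x :: tx) (a :: y :: ty) = encoding_cmp (x :: tx) (y :: ty) by
                  simp [encoding_cmp]]
            rw [alt_cons_cons]
            exact ih (y :: ty)
      · simp [encoding_cmp, encoding_cmp_alt, firstMismatch, hab]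

-- ===== VERDICT (by name: the statement is the Claim_ definition above) =====
theorem encoding_cmp_spec : Claim_equal_encoding_cmp := by
  intro enc1 enc2 _
  unfold Spec_encoding_cmp
  exact ab_eq enc1 enc2
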